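-- pv_equiv track=rewrite | github.com/libraz/midi-sketch-bach | scripts/extract_markov_tables.py | degree_class
-- ===== SOURCE A (Python) =====
-- DC_STABLE = 0
--
-- DC_DOMINANT = 1
--
-- DC_MOTION = 2
--
-- MAJOR_SCALE = [0, 2, 4, 5, 7, 9, 11]
--
-- MINOR_SCALE = [0, 2, 3, 5, 7, 8, 10]
--
-- def degree_class(pitch: int, key: int, is_minor: bool) -> int:
--     """Classify a pitch's scale degree.
--
--     Args:
--         pitch: MIDI pitch number.
--         key: Key root as pitch class.
--         is_minor: True for minor key.
--
--     Returns:
--         DC_STABLE (degrees 0, 2), DC_DOMINANT (degrees 4, 6), or DC_MOTION (degrees 1, 3, 5).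
--     """
--     scale = MINOR_SCALE if is_minor else MAJOR_SCALE
--     relative_pc = (pitch % 12 - key) % 12
--
--     best_deg = 0
--     best_dist = 99
--     for idx, scale_pc in enumerate(scale):
--         dist = min(abs(relative_pc - scale_pc), 12 - abs(relative_pc - scale_pc))
--         if dist < best_dist:
--             best_dist = dist
--             best_deg = idx
--
--     if best_deg in (0, 2):
--         return DC_STABLE
--     if best_deg in (4, 6):
--         return DC_DOMINANT
--     return DC_MOTION
-- ===== SOURCE B (Python) =====
-- # B: replace the runtime nearest-degree scan by two precomputed 12-entry
-- # lookup tables indexed by the relative pitch class.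
-- TABLE_MAJOR = [0, 0, 2, 2, 0, 2, 2, 1, 1, 2, 2, 1]
-- TABLE_MINOR = [0, 0, 2, 0, 0, 2, 2, 1, 2, 2, 1, 0]
--
-- def degree_class(pitch: int, key: int, is_minor: bool) -> int:
--     relative_pc = (pitch % 12 - key) % 12
--     return (TABLE_MINOR if is_minor else TABLE_MAJOR)[relative_pc]
-- ===== Notes on version B (the rewrite author's own statement) =====
-- stated objective: simpler
-- what changed: Replaces the per-call nearest-scale-degree argmin scan over the 7-note scale with two precomputed constant 12-entry tables indexed directly by the relative pitch class.
import Mathlib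
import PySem

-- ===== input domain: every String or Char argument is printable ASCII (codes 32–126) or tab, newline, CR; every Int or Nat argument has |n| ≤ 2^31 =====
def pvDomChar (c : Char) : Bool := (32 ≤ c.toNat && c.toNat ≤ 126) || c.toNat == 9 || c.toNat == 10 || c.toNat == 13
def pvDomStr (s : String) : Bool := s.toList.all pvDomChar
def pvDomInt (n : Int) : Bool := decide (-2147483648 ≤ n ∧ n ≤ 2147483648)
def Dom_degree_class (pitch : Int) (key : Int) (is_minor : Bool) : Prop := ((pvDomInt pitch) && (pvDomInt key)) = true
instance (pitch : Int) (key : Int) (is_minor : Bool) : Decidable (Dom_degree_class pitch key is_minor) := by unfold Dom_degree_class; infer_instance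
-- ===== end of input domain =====

-- B replaces A's per-call nearest-degree argmin scan by two precomputed constant 12-entry lookup tables (simpler).

-- ===== PORT A =====
def MAJOR_SCALE : List Int := [0, 2, 4, 5, 7, 9, 11]
def MINOR_SCALE : List Int := [0, 2, 3, 5, 7, 8, 10]

def degree_class (pitch : Int) (key : Int) (is_minor : Bool) : Int :=
  let scale := if is_minor then MINOR_SCALE else MAJOR_SCALE
  let relative_pc := PySem.Int.mod (PySem.Int.mod pitch 12 - key) 12
  let st := (PySem.List.enumerate scale).foldl
    (fun (b : Int × Int) p =>
      let dist := min (|relative_pc - p.2|) (12 - |relative_pc - p.2|)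
      if dist < b.2 then ((p.1 : Int), dist) else b)
    (0, 99)
  let best_deg := st.1
  if best_deg = 0 ∨ best_deg = 2 then 0
  else if best_deg = 4 ∨ best_deg = 6 then 1
  else 2

-- ===== PORT B =====
def TABLE_MAJOR : List Int := [0, 0, 2, 2, 0, 2, 2, 1, 1, 2, 2, 1]
def TABLE_MINOR : List Int := [0, 0, 2, 0, 0, 2, 2, 1, 2, 2, 1, 0]

-- relative_pc always lies in [0, 12), so this pyGetD equals Python's list indexing (never the default).
def degree_class_alt (pitch : Int) (key : Int) (is_minor : Bool) : Int :=
  let relative_pc := PySem.Int.mod (PySem.Int.mod pitch 12 - key) 12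
  PySem.List.pyGetD (if is_minor then TABLE_MINOR else TABLE_MAJOR) relative_pc 0

-- ===== PRECONDITION & SPEC =====
def Spec_degree_class (pitch : Int) (key : Int) (is_minor : Bool) (out : Int) : Prop := out = degree_class_alt pitch key is_minor
instance (pitch : Int) (key : Int) (is_minor : Bool) (out : Int) : Decidable (Spec_degree_class pitch key is_minor out) := by unfold Spec_degree_class; infer_instance

-- ===== CLAIM (what is proved, stated in full; the proofs are below) =====
def Claim_equal_degree_class : Prop := ∀ (pitch : Int) (key : Int) (is_minor : Bool), Dom_degree_class pitch key is_minor → Spec_degree_class pitch key is_minor (degree_class pitch key is_minor)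

-- ===== LEMMAS AND PROOFS =====

-- ===== VERDICT (by name: the statement is the Claim_ definition above) =====
theorem degree_class_spec : Claim_equal_degree_class := by
  intro pitch key is_minor _
  unfold Spec_degree_class degree_class degree_class_alt
  have h0 : (0 : Int) ≤ PySem.Int.mod (PySem.Int.mod pitch 12 - key) 12 :=
    PySem.Int.mod_nonneg _ (by norm_num)
  have h1 : PySem.Int.mod (PySem.Int.mod pitch 12 - key) 12 < 12 :=
    PySem.Int.mod_lt _ (by norm_num)
  generalize hg : PySem.Int.mod (PySem.Int.mod pitch 12 - key) 12 = r at h0 h1 ⊢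
  interval_cases r <;> cases is_minor <;> decide
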